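-- pv_equiv track=rewrite | github.com/ChouTatsumi/COMP30024-SS | search.py | moveable
-- ===== SOURCE A (Python) =====
-- direction_list = [(-1, 0), (0, -1), (1, -1), (1, 0), (0, 1), (-1, 1)]
--
-- def moveable(state, index_curr, index_dest):
--     #see if destination is occupied
--     if index_dest in state.keys():
--         return False
--     #see if destination is in move range
--     for index in direction_list:
--         if index_dest[0] == (index_curr[0] + index[0]) and \
--             index_dest[1] == (index_curr[1] + index[1]):
--             return True
--     #return False by default
--     return False
-- ===== SOURCE B (Python) =====
-- def moveable(state, index_curr, index_dest):
--     if index_dest in state.keys():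
--         return False
--     # hex-grid distance formula for axial coordinates:
--     # dist = max(|dx|, |dy|, |dx+dy|); adjacent iff distance is exactly 1
--     dx = index_dest[0] - index_curr[0]
--     dy = index_dest[1] - index_curr[1]
--     return max(abs(dx), abs(dy), abs(dx + dy)) == 1
-- ===== Notes on version B (the rewrite author's own statement) =====
-- stated objective: alternative
-- what changed: Replaced the loop over the six direction offsets with the closed-form axial hex-distance formula: adjacency holds iff max(|dx|,|dy|,|dx+dy|) == 1, so no direction table or scan exists in B.
import Mathlib
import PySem

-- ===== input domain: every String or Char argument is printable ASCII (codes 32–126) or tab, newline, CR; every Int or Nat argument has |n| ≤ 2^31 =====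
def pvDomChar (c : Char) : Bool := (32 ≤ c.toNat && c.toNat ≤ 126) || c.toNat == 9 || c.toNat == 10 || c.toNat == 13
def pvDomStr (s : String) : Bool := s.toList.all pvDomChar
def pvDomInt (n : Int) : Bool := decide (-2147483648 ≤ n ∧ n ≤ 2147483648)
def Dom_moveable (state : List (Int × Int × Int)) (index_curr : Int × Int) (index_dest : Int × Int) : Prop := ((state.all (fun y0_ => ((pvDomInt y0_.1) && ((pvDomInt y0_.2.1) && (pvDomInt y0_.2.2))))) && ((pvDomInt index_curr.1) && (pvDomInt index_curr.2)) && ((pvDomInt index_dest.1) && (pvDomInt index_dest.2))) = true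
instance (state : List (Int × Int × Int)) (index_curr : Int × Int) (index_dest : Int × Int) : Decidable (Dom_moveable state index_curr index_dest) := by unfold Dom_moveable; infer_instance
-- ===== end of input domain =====

-- B replaces A's scan over the six direction offsets with the closed-form axial
-- hex-distance test max(|dx|,|dy|,|dx+dy|) == 1; objective: alternative algorithm.


-- ===== PORT A =====
def direction_list : List (Int × Int) := [(-1, 0), (0, -1), (1, -1), (1, 0), (0, 1), (-1, 1)]

-- the `for index in direction_list` loop with its early `return True`
def moveableScan (dirs : List (Int × Int)) (index_curr : Int × Int) (index_dest : Int × Int) : Bool :=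
  match dirs with
  | [] => false
  | index :: rest =>
      if index_dest.1 == index_curr.1 + index.1 && index_dest.2 == index_curr.2 + index.2 then
        true
      else
        moveableScan rest index_curr index_dest

def moveable (state : List (Int × Int × Int)) (index_curr : Int × Int) (index_dest : Int × Int) : Bool :=
  -- `index_dest in state.keys()`
  if state.any (fun kv => (kv.1, kv.2.1) == index_dest) then
    false
  else
    moveableScan direction_list index_curr index_dest

-- ===== PORT B =====
def moveable_alt (state : List (Int × Int × Int)) (index_curr : Int × Int) (index_dest : Int × Int) : Bool :=
  if state.any (fun kv => (kv.1, kv.2.1) == index_dest) then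
    false
  else
    let dx : Int := index_dest.1 - index_curr.1
    let dy : Int := index_dest.2 - index_curr.2
    max (max |dx| |dy|) |dx + dy| == 1

-- ===== PRECONDITION & SPEC =====
def Spec_moveable (state : List (Int × Int × Int)) (index_curr : Int × Int) (index_dest : Int × Int) (out : Bool) : Prop := out = moveable_alt state index_curr index_dest
instance (state : List (Int × Int × Int)) (index_curr : Int × Int) (index_dest : Int × Int) (out : Bool) : Decidable (Spec_moveable state index_curr index_dest out) := by unfold Spec_moveable; infer_instance

-- ===== CLAIM =====
def Claim_equal_moveable : Prop := ∀ (state : List (Int × Int × Int)) (index_curr : Int × Int) (index_dest : Int × Int), Dom_moveable state index_curr index_dest → Spec_moveable state index_curr index_dest (moveable state index_curr index_dest)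

-- ===== LEMMAS AND PROOFS =====
-- A's six-step scan agrees with the hex-distance-1 test
theorem scan_eq_dist (c d : Int × Int) :
    moveableScan direction_list c d =
      (max (max |d.1 - c.1| |d.2 - c.2|) |(d.1 - c.1) + (d.2 - c.2)| == 1) := by
  rcases c with ⟨c1, c2⟩; rcases d with ⟨d1, d2⟩
  rw [Bool.eq_iff_iff]
  simp only [moveableScan, direction_list, Bool.if_true_left, Bool.or_eq_true,
    Bool.and_eq_true, beq_iff_eq, Bool.false_eq_true, or_false, decide_eq_true_eq]
  simp only [Int.abs_eq_natAbs]
  omega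

-- ===== VERDICT =====
theorem moveable_spec : Claim_equal_moveable := by
  intro state c d _
  unfold Spec_moveable moveable moveable_alt
  split
  · rfl
  · exact scan_eq_dist c d
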